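-- pv_equiv track=rewrite | github.com/2024eli/AI | Gridworld/gw2.py | stringSlc
-- ===== SOURCE A (Python) =====
-- def stringSlc(slice, arr):
--   indicesOfColon = []
--   for i in range(len(slice)):
--     if slice[i] == ':':
--       indicesOfColon.append(i)
--   if len(indicesOfColon) == 0: #index
--     return [arr[int(slice)]]
--   elif len(indicesOfColon) == 1: #range
--     start = int(slice[:indicesOfColon[0]]) if slice[:indicesOfColon[0]] else 0
--     end = int(slice[indicesOfColon[0]+1:]) if slice[indicesOfColon[0]+1:] else None
--     if end == None:
--       return arr[start:]
--     return arr[start:end] #when its empty no work cuz int(empty) no work!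
--   else: #steps
--     start = int(slice[:indicesOfColon[0]]) if slice[:indicesOfColon[0]] else 0
--     return arr[start::int(slice[indicesOfColon[1]+1:])]
-- ===== SOURCE B (Python) =====
-- _mkslice = slice  # keep a handle on the builtin: the parameter below shadows its name
--
-- def stringSlc(slice, arr):
--   head, sep1, tail = slice.partition(':')
--   if not sep1:  # no colon: plain index
--     return [arr[int(slice)]]
--   start = int(head) if head else 0
--   mid, sep2, rest = tail.partition(':')
--   if not sep2:  # one colon: start:stop, step 1
--     stop = int(mid) if mid else None
--     step = 1
--   else:         # two or more colons: start::step, step = everything after the 2nd colon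
--     stop = None
--     step = int(rest)
--   s, e, st = _mkslice(start, stop, step).indices(len(arr))
--   return [arr[i] for i in range(s, e, st)]
-- ===== Notes on version B (the rewrite author's own statement) =====
-- stated objective: alternative
-- what changed: B parses with two str.partition(':') calls instead of A's colon-position scan and index-arithmetic substrings, and replaces A's three native slicing returns by one uniform application: normalize (start, stop, step) with slice(...).indices(len(arr)) and build the output as a comprehension over range(s, e, st).
import Mathlib
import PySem

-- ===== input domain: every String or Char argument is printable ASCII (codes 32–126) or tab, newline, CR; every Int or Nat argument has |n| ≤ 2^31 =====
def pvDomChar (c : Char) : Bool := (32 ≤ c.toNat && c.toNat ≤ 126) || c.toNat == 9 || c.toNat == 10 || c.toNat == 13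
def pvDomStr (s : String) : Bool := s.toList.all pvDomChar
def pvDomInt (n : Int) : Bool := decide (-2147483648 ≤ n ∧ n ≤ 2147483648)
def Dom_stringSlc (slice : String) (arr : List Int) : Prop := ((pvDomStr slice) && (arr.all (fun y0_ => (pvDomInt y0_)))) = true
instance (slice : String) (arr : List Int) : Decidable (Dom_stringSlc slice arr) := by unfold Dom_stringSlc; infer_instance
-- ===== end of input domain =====

-- B parses with two partition(':') calls instead of A's colon-index scan, and applies ONE uniform
-- slice.indices(len) + range comprehension instead of A's three native-slicing branches (alternative).

-- ===== PORT A =====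
-- literal transliteration of A: scan for colon indices, then branch on how many there are,
-- cutting the string by index arithmetic.  Where Python raises (int() ValueError, IndexError,
-- zero slice step) the PySem primitive yields none and the port returns [] (outside Pre_).
def stringSlc (slice : String) (arr : List Int) : List Int :=
  let cs := slice.toList
  let idxs : List Int :=
    (PySem.List.pyRange 0 (cs.length : Int) 1).foldl
      (fun acc i => if PySem.List.pyGet? cs i = some ':' then acc ++ [i] else acc) []
  if idxs.length = 0 then
    -- return [arr[int(slice)]]
    match PySem.Int.ofStr? slice with
    | none => []
    | some n =>
      match PySem.List.pyGet? arr n with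
      | none => []
      | some v => [v]
  else if idxs.length = 1 then
    let i0 := idxs.getD 0 0
    let pre := PySem.List.slice cs none (some i0)
    let post := PySem.List.slice cs (some (i0 + 1)) none
    match (if pre.isEmpty then some (0 : Int) else PySem.Int.ofChars? pre) with
    | none => []
    | some start =>
      if post.isEmpty then PySem.List.slice arr (some start) none
      else
        match PySem.Int.ofChars? post with
        | none => []
        | some e => PySem.List.slice arr (some start) (some e)
  else
    let i0 := idxs.getD 0 0
    let i1 := idxs.getD 1 0
    let pre := PySem.List.slice cs none (some i0)
    match (if pre.isEmpty then some (0 : Int) else PySem.Int.ofChars? pre) with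
    | none => []
    | some start =>
      match PySem.Int.ofChars? (PySem.List.slice cs (some (i1 + 1)) none) with
      | none => []
      | some step => (PySem.List.slice? arr (some start) none step).getD []

-- ===== PORT B =====
-- hand port of Python's s.partition(':') on the char list (PySem has no partition):
-- 'none' = separator absent (Python returns (s, '', '')), 'some (h, t)' = (h, ':', t).
def charsPartition : List Char → Option (List Char × List Char)
  | [] => none
  | c :: rest =>
    if c = ':' then some ([], rest)
    else (charsPartition rest).map (fun p => (c :: p.1, p.2))

-- port of 's, e, st = _mkslice(start, stop, step).indices(len(arr))' followed by
-- '[arr[i] for i in range(s, e, st)]': slice(...).indices is PySem.List.sliceIndices, range is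
-- pyRange; indices normalizes every produced i into range, so the comprehension's arr[i] never
-- raises — porting it with pyGet? via filterMap is exact.
def applySliceIndices (arr : List Int) (start? stop? : Option Int) (step : Int) : List Int :=
  let t := PySem.List.sliceIndices arr.length start? stop? step
  (PySem.List.pyRange t.1 t.2.1 t.2.2).filterMap (fun i => PySem.List.pyGet? arr i)

-- literal transliteration of Source B: partition twice, then one uniform indices+range application.
def stringSlc_alt (slice : String) (arr : List Int) : List Int :=
  match charsPartition slice.toList with
  | none =>
    -- no colon: return [arr[int(slice)]]
    match PySem.Int.ofStr? slice with
    | none => []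
    | some n =>
      match PySem.List.pyGet? arr n with
      | none => []
      | some v => [v]
  | some (head, tail) =>
    match (if head.isEmpty then some (0 : Int) else PySem.Int.ofChars? head) with
    | none => []
    | some start =>
      match charsPartition tail with
      | none =>
        -- one colon: stop = int(tail) if tail else None, step = 1
        if tail.isEmpty then applySliceIndices arr (some start) none 1
        else
          match PySem.Int.ofChars? tail with
          | none => []
          | some stp => applySliceIndices arr (some start) (some stp) 1
      | some (_mid, rest) =>
        -- two or more colons: stop = None, step = int(rest)
        match PySem.Int.ofChars? rest with
        | none => []
        | some step =>
          if step = 0 then []   -- slice.indices raises ValueError on step 0 (outside Pre_)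
          else applySliceIndices arr (some start) none step

-- ===== PRECONDITION & SPEC =====
-- a segment may be empty (Python then defaults it) or must parse as an int
def pvSegOk (s : String) : Bool := s == "" || (PySem.Int.ofStr? s).isSome
-- Pre_ = exactly the inputs on which Python A returns: every int() it reaches parses
-- (ValueError otherwise), the plain index is in range (IndexError), and the step is non-zero.
def Pre_stringSlc (slice : String) (arr : List Int) : Prop :=
  (let parts := (PySem.Str.split? slice ":").getD []
   if parts.length = 1 then
     (match PySem.Int.ofStr? slice with
      | some n => (PySem.List.pyGet? arr n).isSome
      | none => false)
   else if parts.length = 2 then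
     pvSegOk (parts.getD 0 "") && pvSegOk (parts.getD 1 "")
   else
     pvSegOk (parts.getD 0 "") &&
       (match PySem.Int.ofStr? (PySem.Str.join ":" (parts.drop 2)) with
        | some s => s != 0
        | none => false)) = true
instance (slice : String) (arr : List Int) : Decidable (Pre_stringSlc slice arr) := by
  unfold Pre_stringSlc; infer_instance
def pvWitness_stringSlc : String × List Int := ("1:3", [0, 1, 2, 3, 4])
def Spec_stringSlc (slice : String) (arr : List Int) (out : List Int) : Prop := out = stringSlc_alt slice arr
instance (slice : String) (arr : List Int) (out : List Int) : Decidable (Spec_stringSlc slice arr out) := by unfold Spec_stringSlc; infer_instance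

-- ===== CLAIM (what is proved, stated in full; the proofs are below) =====
def Claim_equal_stringSlc : Prop := ∀ (slice : String) (arr : List Int), Dom_stringSlc slice arr → Pre_stringSlc slice arr → Spec_stringSlc slice arr (stringSlc slice arr)

-- ===== LEMMAS AND PROOFS =====

def natIdxs (cs : List Char) : List Nat :=
  (List.range cs.length).filter (fun i => decide (cs[i]? = some ':'))

theorem natIdxs_cons (c : Char) (cs : List Char) :
    natIdxs (c :: cs) = (if c = ':' then [0] else []) ++ (natIdxs cs).map (· + 1) := by
  unfold natIdxs
  rw [List.length_cons, List.range_succ_eq_map, List.filter_cons, List.filter_map]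
  simp only [List.getElem?_cons_zero, Function.comp_def, Nat.succ_eq_add_one,
    List.getElem?_cons_succ]
  by_cases hc : c = ':' <;> · simp [hc]; rfl

theorem natIdxs_no_colon (cs : List Char) (h : ':' ∉ cs) : natIdxs cs = [] := by
  induction cs with
  | nil => rfl
  | cons c rest ih =>
    rw [natIdxs_cons, ih (fun hm => h (List.mem_cons_of_mem _ hm))]
    have : ¬ c = ':' := fun e => h (by simp [e])
    simp [this]

theorem natIdxs_decomp (a b : List Char) (h : ':' ∉ a) :
    natIdxs (a ++ ':' :: b) = a.length :: (natIdxs b).map (· + (a.length + 1)) := by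
  induction a with
  | nil => rw [List.nil_append, natIdxs_cons]; simp
  | cons c a' ih =>
    have hc : ¬ c = ':' := fun e => h (by simp [e])
    rw [List.cons_append, natIdxs_cons, ih (fun hm => h (List.mem_cons_of_mem _ hm))]
    simp [hc, Function.comp_def]
    exact fun x _ => by omega

theorem charsPartition_no_colon (cs : List Char) (h : ':' ∉ cs) : charsPartition cs = none := by
  induction cs with
  | nil => rfl
  | cons c rest ih =>
    have hc : ¬ c = ':' := fun e => h (by simp [e])
    rw [charsPartition, if_neg hc, ih (fun hm => h (List.mem_cons_of_mem _ hm))]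
    rfl

theorem charsPartition_decomp (a b : List Char) (h : ':' ∉ a) :
    charsPartition (a ++ ':' :: b) = some (a, b) := by
  induction a with
  | nil => simp [charsPartition]
  | cons c a' ih =>
    have hc : ¬ c = ':' := fun e => h (by simp [e])
    rw [List.cons_append, charsPartition, if_neg hc, ih (fun hm => h (List.mem_cons_of_mem _ hm))]
    rfl

theorem idxs_eq (cs : List Char) :
    (PySem.List.pyRange 0 (cs.length : Int) 1).foldl
      (fun acc i => if PySem.List.pyGet? cs i = some ':' then acc ++ [i] else acc) []
      = (natIdxs cs).map Int.ofNat := by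
  rw [PySem.List.pyRange_zero_natCast]
  rw [show (fun (acc : List Int) i => if PySem.List.pyGet? cs i = some ':' then acc ++ [i] else acc)
      = (fun acc i => if (decide (PySem.List.pyGet? cs i = some ':')) = true then acc ++ [id i] else acc) from by
    funext acc i; simp]
  rw [PySem.List.foldl_append_if]
  rw [List.nil_append, List.filter_map, List.map_map]
  have hf : List.filter ((fun i => decide (PySem.List.pyGet? cs i = some ':')) ∘ fun (k : Nat) => (k : Int))
      (List.range cs.length) = natIdxs cs := by
    unfold natIdxs
    apply List.filter_congr
    intro i _
    simp [Function.comp, PySem.List.pyGet?_natCast]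
  rw [hf]
  simp only [Function.comp_def, id_eq]
  rfl

theorem exists_first_colon (cs : List Char) (h : ':' ∈ cs) :
    ∃ a b, cs = a ++ ':' :: b ∧ ':' ∉ a := by
  induction cs with
  | nil => simp at h
  | cons c rest ih =>
    by_cases hc : c = ':'
    · exact ⟨[], rest, by simp [hc], by simp⟩
    · have h' : ':' ∈ rest := by
        rcases List.mem_cons.mp h with h1 | h1
        · exact absurd h1.symm hc
        · exact h1
      obtain ⟨a, b, rfl, ha⟩ := ih h'
      refine ⟨c :: a, b, rfl, ?_⟩
      simp only [List.mem_cons, not_or]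
      exact ⟨fun e => hc e.symm, ha⟩

-- ---- the slicing core: B's indices+range comprehension computes Python slicing ----

theorem filterMap_range_getElem (xs : List Int) (a n : Nat) :
    (List.range n).filterMap (fun k => xs[a + k]?) = (xs.drop a).take n := by
  induction n with
  | zero => simp
  | succ m ih =>
    rw [List.range_succ, List.filterMap_append, ih, List.take_add_one]
    congr 1
    cases hx : xs[a + m]? with
    | none =>
      have h1 : (xs.drop a)[m]? = none := by rw [List.getElem?_drop]; exact hx
      simp [h1]
      exact List.getElem?_eq_none_iff.mp hx
    | some v =>
      have h1 : (xs.drop a)[m]? = some v := by rw [List.getElem?_drop]; exact hx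
      simp [h1, hx]

theorem sliceIndices_third (n : Nat) (a? b? : Option Int) (st : Int) :
    (PySem.List.sliceIndices n a? b? st).2.2 = st := by
  simp [PySem.List.sliceIndices]

theorem sliceIndices_start_nonneg (n : Nat) (a? b? : Option Int) (st : Int) (hst : 0 < st) :
    0 ≤ (PySem.List.sliceIndices n a? b? st).1 := by
  simp only [PySem.List.sliceIndices]
  cases a? <;> split_ifs <;> simp <;> omega

theorem sliceIndices_stop_neg (n : Nat) (a? b? : Option Int) (st : Int) (hst : st < 0) :
    -1 ≤ (PySem.List.sliceIndices n a? b? st).2.1 := by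
  simp only [PySem.List.sliceIndices]
  cases b? <;> split_ifs <;> (simp; try omega)

theorem sliceIndices_one (n : Nat) (a? b? : Option Int) :
    PySem.List.sliceIndices n a? b? 1
      = ((((match a? with | none => 0 | some i => PySem.List.clampIdx n i) : Nat) : Int),
         (((match b? with | none => n | some i => PySem.List.clampIdx n i) : Nat) : Int), 1) := by
  simp only [PySem.List.sliceIndices, PySem.List.clampIdx]
  cases a? <;> cases b? <;> split_ifs <;> simp <;> omega

-- B's core = the getD [] of PySem's slice?, for any non-zero step
theorem applySliceIndices_eq_slice? (xs : List Int) (a? b? : Option Int) (st : Int) (hst : st ≠ 0) :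
    applySliceIndices xs a? b? st = (PySem.List.slice? xs a? b? st).getD [] := by
  unfold applySliceIndices PySem.List.slice?
  rw [if_neg hst]
  have hs0 : 0 < st → 0 ≤ (PySem.List.sliceIndices xs.length a? b? st).1 :=
    sliceIndices_start_nonneg xs.length a? b? st
  have he0 : st < 0 → -1 ≤ (PySem.List.sliceIndices xs.length a? b? st).2.1 :=
    sliceIndices_stop_neg xs.length a? b? st
  have h3 := sliceIndices_third xs.length a? b? st
  rcases hsi : PySem.List.sliceIndices xs.length a? b? st with ⟨s, e, st2⟩
  rw [hsi] at hs0 he0 h3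
  simp only at hs0 he0 h3
  subst h3
  simp only [Option.getD_some]
  unfold PySem.List.pyRange
  rw [if_neg hst]
  rw [List.filterMap_map]
  apply List.filterMap_congr
  intro k hk
  simp only [Function.comp_apply]
  apply PySem.List.pyGet?_of_nonneg
  rcases lt_or_gt_of_ne hst with hneg | hpos
  · -- negative step : every produced index exceeds e ≥ -1
    have he : -1 ≤ e := he0 hneg
    rw [List.mem_range, if_neg (by omega)] at hk
    by_cases hes : e < s
    · rw [if_pos hes] at hk
      generalize hq : (s - e + -st2 - 1) / -st2 = q at hk
      have hcount : (k : Int) + 1 ≤ q := by omega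
      rw [← hq] at hcount
      have hmul := (Int.le_ediv_iff_mul_le (show (0 : Int) < -st2 by omega)).mp hcount
      nlinarith
    · rw [if_neg hes] at hk; simp at hk
  · -- positive step : s ≥ 0 and k ≥ 0
    have hs : 0 ≤ s := hs0 hpos
    nlinarith [Int.natCast_nonneg k, hpos, hs]

theorem applyCore (xs : List Int) (A B : Nat) :
    (PySem.List.pyRange (A : Int) (B : Int) 1).filterMap (fun i => PySem.List.pyGet? xs i)
      = (xs.drop A).take (B - A) := by
  rw [PySem.List.pyRange_one, List.filterMap_map]
  have hfun : ((fun i => PySem.List.pyGet? xs i) ∘ fun k : Nat => (A : Int) + ↑k)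
      = fun k : Nat => xs[A + k]? := by
    funext k
    simp only [Function.comp_apply]
    rw [show (A : Int) + (k : Int) = ((A + k : Nat) : Int) from by push_cast; ring,
      PySem.List.pyGet?_natCast]
  rw [hfun, show ((B : Int) - (A : Int)).toNat = B - A from by omega, filterMap_range_getElem]

theorem applySliceIndices_one_eq_slice (xs : List Int) (a? b? : Option Int) :
    applySliceIndices xs a? b? 1 = PySem.List.slice xs a? b? := by
  unfold applySliceIndices PySem.List.slice
  rw [sliceIndices_one]
  exact applyCore xs _ _

-- ---- main equivalence ----

theorem main_eq (slice : String) (arr : List Int) :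
    stringSlc slice arr = stringSlc_alt slice arr := by
  simp only [stringSlc, stringSlc_alt]
  rw [idxs_eq]
  by_cases h : ':' ∈ slice.toList
  · obtain ⟨a, b, hab, ha⟩ := exists_first_colon _ h
    by_cases h2 : ':' ∈ b
    · -- two or more colons
      obtain ⟨a2, b2, hb2, ha2⟩ := exists_first_colon _ h2
      rw [hab, hb2, natIdxs_decomp a (a2 ++ ':' :: b2) ha, natIdxs_decomp a2 b2 ha2]
      simp only [charsPartition_decomp a (a2 ++ ':' :: b2) ha, charsPartition_decomp a2 b2 ha2]
      simp only [List.map_cons, List.length_cons, List.length_map,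
        List.getD_cons_zero, List.getD_cons_succ]
      rw [if_neg (by omega), if_neg (by omega)]
      have hpre : PySem.List.slice (a ++ ':' :: (a2 ++ ':' :: b2)) none (some (Int.ofNat a.length)) = a := by
        rw [show Int.ofNat a.length = ((a.length : Nat) : Int) from rfl, PySem.List.slice_to_natCast]
        exact List.take_left
      have hstepA : PySem.List.slice (a ++ ':' :: (a2 ++ ':' :: b2))
          (some (Int.ofNat (a2.length + (a.length + 1)) + 1)) none = b2 := by
        rw [show (Int.ofNat (a2.length + (a.length + 1)) + 1)
            = ((a2.length + (a.length + 1) + 1 : Nat) : Int) from by simp only [Int.ofNat_eq_natCast]; push_cast; ring,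
          PySem.List.slice_from_natCast]
        rw [show a ++ ':' :: (a2 ++ ':' :: b2) = ((a ++ [':']) ++ (a2 ++ [':'])) ++ b2 from by simp,
          show a2.length + (a.length + 1) + 1 = ((a ++ [':']) ++ (a2 ++ [':'])).length from by
            simp; omega]
        exact List.drop_left
      rw [hpre, hstepA]
      cases hstart : (if a.isEmpty then some (0 : Int) else PySem.Int.ofChars? a) with
      | none => rfl
      | some start =>
        cases hstep : PySem.Int.ofChars? b2 with
        | none => rfl
        | some step =>
          by_cases hz : step = 0
          · subst hz
            simp [PySem.List.slice?]
          · simp only [if_neg hz,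
              applySliceIndices_eq_slice? arr (some start) none step hz]
    · -- exactly one colon
      rw [hab, natIdxs_decomp a b ha, natIdxs_no_colon b h2]
      simp only [charsPartition_decomp a b ha, charsPartition_no_colon b h2]
      simp only [List.map_cons, List.map_nil, List.length_cons, List.length_nil,
        Nat.zero_add, List.getD_cons_zero]
      simp only [reduceIte]
      have hpre : PySem.List.slice (a ++ ':' :: b) none (some (Int.ofNat a.length)) = a := by
        rw [show Int.ofNat a.length = ((a.length : Nat) : Int) from rfl, PySem.List.slice_to_natCast]
        exact List.take_left
      have hpost : PySem.List.slice (a ++ ':' :: b) (some (Int.ofNat a.length + 1)) none = b := by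
        rw [show (Int.ofNat a.length + 1) = ((a.length + 1 : Nat) : Int) from by
            simp only [Int.ofNat_eq_natCast]; push_cast; ring,
          PySem.List.slice_from_natCast]
        rw [show a ++ ':' :: b = (a ++ [':']) ++ b from by simp,
          show a.length + 1 = (a ++ [':']).length from by simp]
        exact List.drop_left
      rw [hpre, hpost]
      cases hstart : (if a.isEmpty then some (0 : Int) else PySem.Int.ofChars? a) with
      | none => rfl
      | some start =>
        by_cases hb : b.isEmpty = true
        · simp only [if_pos hb, applySliceIndices_one_eq_slice]
          exact if_neg one_ne_zero
        · simp only [if_neg hb]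
          cases hstop : PySem.Int.ofChars? b with
          | none => rfl
          | some stp =>
            simp only [applySliceIndices_one_eq_slice]
            exact if_neg one_ne_zero
  · rw [natIdxs_no_colon _ h]
    simp only [charsPartition_no_colon _ h]
    simp

-- ===== VERDICT (by name: the statement is the Claim_ definition above) =====
theorem stringSlc_spec : Claim_equal_stringSlc := by
  intro slice arr _ _
  unfold Spec_stringSlc
  exact main_eq slice arr
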